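-- pv_equiv track=rewrite | github.com/pypi-data/pypi-mirror-403 | packages/ascetic-ddd/ascetic_ddd-0.1.5.tar.gz/ascetic_ddd-0.1.5/ascetic_ddd/jsonpath2_ext/domain/jsonpath2_parameterized_parser.py | _normalize_logical_operators
-- ===== SOURCE A (Python) =====
-- def _normalize_logical_operators(template: str) -> str:
--     """
--     Normalize RFC 9535 logical operators to jsonpath2 text operators.
--
--     RFC 9535 standard defines: &&, ||, !
--     jsonpath2 library uses text operators: and, or, not
--     This method normalizes symbol operators to text operators.
--
--     Args:
--         template: JSONPath template string
--
--     Returns: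
--         Normalized template with text logical operators
--     """
--     result = []
--     i = 0
--     in_string = False
--     string_char = None
--
--     while i < len(template):
--         char = template[i]
--
--         # Track if we're inside a string literal
--         if char in ('"', "'") and (i == 0 or template[i-1] != '\\'):
--             if not in_string:
--                 in_string = True
--                 string_char = char
--             elif char == string_char:
--                 in_string = False
--                 string_char = None
--
--         if not in_string:
--             # Replace && with and
--             if char == '&' and i + 1 < len(template) and template[i + 1] == '&':
--                 result.append(' and ')
--                 i += 2
--                 continue
--
--             # Replace || with or
--             elif char == '|' and i + 1 < len(template) and template[i + 1] == '|':
--                 result.append(' or ')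
--                 i += 2
--                 continue
--
--             # Replace ! with not (but not in !=)
--             elif char == '!' and i + 1 < len(template) and template[i + 1] != '=':
--                 # Special case: ?!(...) should become ?(not ...) not ?not (...)
--                 # Check if previous non-space char is ?
--                 if result and ''.join(result).rstrip().endswith('?'):
--                     # Convert ?!(...) to ?(not ...)
--                     # Skip the ! and the opening paren, add (not
--                     if i + 1 < len(template) and template[i + 1] == '(':
--                         result.append('(not ')
--                         i += 2  # Skip ! and (
--                         continue
--                 result.append('not ')
--                 i += 1
--                 continue
--
--         result.append(char)
--         i += 1
--
--     return ''.join(result)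
-- ===== SOURCE B (Python) =====
-- def _normalize_logical_operators(template: str) -> str:
--     """One for-loop over enumerate with a skip counter; the output is a flat list of
--     characters and a boolean flag records whether the last non-space character emitted
--     was a question mark, so the filter-negation lookback is an O(1) test instead of
--     re-joining the result."""
--     out = []            # characters
--     last_q = False      # last non-whitespace character emitted is '?'
--     quote = None        # current string delimiter, or None when outside a literal
--     skip = 0
--     n = len(template)
--     for i, ch in enumerate(template):
--         if skip:
--             skip -= 1
--             continue
--         if ch in '"\'' and (i == 0 or template[i - 1] != '\\'):
--             if quote is None:
--                 quote = ch
--             elif quote == ch: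
--                 quote = None
--         nxt = template[i + 1] if i + 1 < n else ''
--         if quote is None and ch == '&' and nxt == '&':
--             out.extend(' and ')
--             last_q = False
--             skip = 1
--         elif quote is None and ch == '|' and nxt == '|':
--             out.extend(' or ')
--             last_q = False
--             skip = 1
--         elif quote is None and ch == '!' and nxt not in ('', '='):
--             if last_q and nxt == '(':
--                 out.extend('(not ')
--                 skip = 1
--             else:
--                 out.extend('not ')
--             last_q = False
--         else:
--             out.append(ch)
--             if not ch.isspace():
--                 last_q = (ch == '?')
--     return ''.join(out)
-- ===== Notes on version B (the rewrite author's own statement) =====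
-- stated objective: alternative
-- what changed: B does one for-loop over enumerate with a skip counter, emits plain characters, and keeps a boolean flag recording whether the last non-space character emitted was a question mark, replacing A's while-loop over a list of string pieces that re-joins and rstrips the whole accumulated result at every negation operator.
import Mathlib
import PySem

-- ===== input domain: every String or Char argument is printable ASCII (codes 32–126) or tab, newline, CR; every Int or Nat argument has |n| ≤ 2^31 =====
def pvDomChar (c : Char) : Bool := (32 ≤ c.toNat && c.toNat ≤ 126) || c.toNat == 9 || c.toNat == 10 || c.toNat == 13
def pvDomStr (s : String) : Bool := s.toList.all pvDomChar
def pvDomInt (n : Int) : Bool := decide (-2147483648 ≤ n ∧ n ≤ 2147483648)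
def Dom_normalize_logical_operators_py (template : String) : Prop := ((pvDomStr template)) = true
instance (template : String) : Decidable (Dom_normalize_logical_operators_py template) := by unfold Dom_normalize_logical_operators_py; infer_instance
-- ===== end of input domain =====

-- B replaces A's list-of-pieces while-loop (which re-joins and rstrips the whole accumulated
-- result at every negation operator) by one fold over the enumerated characters with a skip
-- counter, a flat character output and a boolean question-mark-lookback flag (objective: alternative).


-- ===== PORT A =====
-- A's string-literal tracking block (the first `if` of the loop body), verbatim
def pvTrackA (c : Char) (prev : Option Char) (inString : Bool) (stringChar : Option Char) :
    Bool × Option Char :=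
  if (c = '"' ∨ c = '\'') ∧ prev ≠ some '\\' then
    if !inString then (true, some c)
    else if some c = stringChar then (false, none)
    else (inString, stringChar)
  else (inString, stringChar)

-- the while loop of A: `rest` is template[i:], `prev` is template[i-1] (none at i = 0),
-- `result` the list of appended strings; each step mirrors A's branches in order.
def pvLoopA (rest : List Char) (prev : Option Char) (inString : Bool)
    (stringChar : Option Char) (result : List String) : List String :=
  match rest with
  | [] => result
  | c :: rs =>
    match pvTrackA c prev inString stringChar with
    | (inS, sC) =>
      if inS = false then
        if c = '&' ∧ rs.head? = some '&' then
          pvLoopA rs.tail (some '&') inS sC (result ++ [" and "])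
        else if c = '|' ∧ rs.head? = some '|' then
          pvLoopA rs.tail (some '|') inS sC (result ++ [" or "])
        else if c = '!' ∧ rs ≠ [] ∧ rs.head? ≠ some '=' then
          if result ≠ [] ∧
              PySem.Chars.endswith
                (PySem.Chars.rstrip (PySem.Chars.join [] (result.map String.toList))) ['?'] = true ∧
              rs.head? = some '(' then
            pvLoopA rs.tail (some '(') inS sC (result ++ ["(not "])
          else
            pvLoopA rs (some '!') inS sC (result ++ ["not "])
        else
          pvLoopA rs (some c) inS sC (result ++ [String.ofList [c]])
      else
        pvLoopA rs (some c) inS sC (result ++ [String.ofList [c]])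
  termination_by rest.length
  decreasing_by all_goals (cases rs <;> simp)

def normalize_logical_operators_py (template : String) : String :=
  PySem.Str.join "" (pvLoopA template.toList none false none [])

-- ===== PORT B =====
-- B's loop state: the skip counter, the open string delimiter (None outside a literal),
-- the "last non-whitespace character emitted is '?'" flag, and the emitted characters.
structure PvSt where
  skip : Nat
  quote : Option Char
  lastQ : Bool
  out : List Char

-- one iteration of B's `for i, ch in enumerate(template)` body
def pvStep (tl : List Char) (st : PvSt) (p : Int × Char) : PvSt :=
  if st.skip ≠ 0 then { st with skip := st.skip - 1 }
  else
    let i := p.1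
    let ch := p.2
    let quote :=
      if (ch = '"' ∨ ch = '\'') ∧ (i = 0 ∨ PySem.List.pyGet? tl (i - 1) ≠ some '\\') then
        match st.quote with
        | none => some ch
        | some q => if q = ch then none else some q
      else st.quote
    -- `nxt`: template[i+1] when in range (Python's '' sentinel becomes `none`)
    let nxt := PySem.List.pyGet? tl (i + 1)
    if quote = none ∧ ch = '&' ∧ nxt = some '&' then
      ⟨1, quote, false, st.out ++ (" and ").toList⟩
    else if quote = none ∧ ch = '|' ∧ nxt = some '|' then
      ⟨1, quote, false, st.out ++ (" or ").toList⟩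
    else if quote = none ∧ ch = '!' ∧ nxt ≠ none ∧ nxt ≠ some '=' then
      if st.lastQ ∧ nxt = some '(' then
        ⟨1, quote, false, st.out ++ ("(not ").toList⟩
      else
        ⟨0, quote, false, st.out ++ ("not ").toList⟩
    else
      ⟨0, quote, (if PySem.Chars.isspace ch then st.lastQ else decide (ch = '?')),
        st.out ++ [ch]⟩

def normalize_logical_operators_py_alt (template : String) : String :=
  String.ofList
    ((PySem.List.enumerate template.toList).foldl (pvStep template.toList)
      ⟨0, none, false, []⟩).out

-- ===== PRECONDITION & SPEC =====
def Spec_normalize_logical_operators_py (template : String) (out : String) : Prop := out = normalize_logical_operators_py_alt template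
instance (template : String) (out : String) : Decidable (Spec_normalize_logical_operators_py template out) := by unfold Spec_normalize_logical_operators_py; infer_instance

-- ===== CLAIM =====
def Claim_equal_normalize_logical_operators_py : Prop := ∀ (template : String), Dom_normalize_logical_operators_py template → Spec_normalize_logical_operators_py template (normalize_logical_operators_py template)

-- ===== LEMMAS AND PROOFS =====

-- last non-whitespace character of a character list
def pvLastNW (l : List Char) : Option Char :=
  (l.reverse.dropWhile PySem.Chars.isspace).head?

-- last non-whitespace character of a joined result list
def pvLastNWs (result : List String) : Option Char :=
  pvLastNW (result.map String.toList).flatten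

-- prev pointer of A at position i
def pvPrev (tl : List Char) (i : Nat) : Option Char :=
  if i = 0 then none else tl[i-1]?

-- B's quote toggle, abstracted over the already-resolved backslash test
def pvToggle (c : Char) (prev : Option Char) (quote : Option Char) : Option Char :=
  if (c = '"' ∨ c = '\'') ∧ prev ≠ some '\\' then
    match quote with
    | none => some c
    | some q => if q = c then none else some q
  else quote

theorem pv_join_nil_eq_flatten (xs : List (List Char)) :
    PySem.Chars.join [] xs = xs.flatten := by
  induction xs with
  | nil => rfl
  | cons a l ih =>
    cases l with
    | nil => simp [PySem.Chars.join, List.intercalate]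
    | cons b m =>
      simp only [PySem.Chars.join, List.intercalate] at *
      simp [List.intersperse] at *
      simpa using ih

theorem pvLastNW_append (l m : List Char) :
    pvLastNW (l ++ m) = (pvLastNW m).or (pvLastNW l) := by
  unfold pvLastNW
  rw [List.reverse_append, List.dropWhile_append]
  cases h : (m.reverse.dropWhile PySem.Chars.isspace) with
  | nil => simp
  | cons a t => simp

theorem pvLastNWs_append (result : List String) (s : String) :
    pvLastNWs (result ++ [s]) = (pvLastNW s.toList).or (pvLastNWs result) := by
  unfold pvLastNWs
  simp [pvLastNW_append]

-- A's '?'-lookback test on the raw characters, characterised by pvLastNW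
theorem pv_ends_iff (X : List Char) :
    (PySem.Chars.endswith (PySem.Chars.rstrip X) ['?'] = true) ↔ pvLastNW X = some '?' := by
  unfold PySem.Chars.rstrip pvLastNW
  rw [PySem.Chars.endswith_iff]
  constructor
  · rintro ⟨t, ht⟩
    have hD : X.reverse.dropWhile PySem.Chars.isspace = '?' :: t.reverse := by
      have h2 := congrArg List.reverse ht
      simpa using h2.symm
    simp [hD]
  · intro h
    cases hD : X.reverse.dropWhile PySem.Chars.isspace with
    | nil => rw [hD] at h; simp at h
    | cons a t =>
      rw [hD] at h
      simp only [List.head?] at h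
      injection h with h
      exact ⟨t.reverse, by simp [hD, h]⟩

-- A's full condition (result nonempty ∧ endswith) equals B's tracked flag
theorem pv_cond_iff (result : List String) :
    (result ≠ [] ∧
      PySem.Chars.endswith
        (PySem.Chars.rstrip (PySem.Chars.join [] (result.map String.toList))) ['?'] = true)
      ↔ pvLastNWs result = some '?' := by
  rw [pv_join_nil_eq_flatten, pv_ends_iff]
  unfold pvLastNWs
  constructor
  · exact And.right
  · intro h
    refine ⟨?_, h⟩
    rintro rfl
    simp [pvLastNW] at h

theorem pvLastNW_single (c : Char) :
    pvLastNW [c] = if PySem.Chars.isspace c then none else some c := by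
  by_cases h : PySem.Chars.isspace c = true <;> simp [pvLastNW, List.dropWhile, h]

-- A's track block equals B's toggle, when A is fed the consistent (isSome, itself) pair
theorem pv_track_eq (c : Char) (prev quote : Option Char) :
    pvTrackA c prev quote.isSome quote
      = ((pvToggle c prev quote).isSome, pvToggle c prev quote) := by
  unfold pvTrackA pvToggle
  by_cases h : (c = '"' ∨ c = '\'') ∧ prev ≠ some '\\'
  · rw [if_pos h, if_pos h]
    cases quote with
    | none => simp
    | some q =>
      by_cases hq : q = c
      · simp [hq]
      · simp [hq, Ne.symm hq]
  · rw [if_neg h, if_neg h]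

-- the index-based backslash test in pvStep equals the prev-based one
theorem pv_bs_eq (tl : List Char) (i : Nat) :
    (((i : Int) = 0 ∨ PySem.List.pyGet? tl ((i : Int) - 1) ≠ some '\\'))
      ↔ (pvPrev tl i ≠ some '\\') := by
  unfold pvPrev
  cases i with
  | zero => simp
  | succ k =>
    have h1 : ((k + 1 : Nat) : Int) - 1 = (k : Int) := by push_cast; ring
    rw [h1, PySem.List.pyGet?_natCast, if_neg (by omega : ¬ k + 1 = 0)]
    have h2 : k + 1 - 1 = k := rfl
    rw [h2]
    constructor
    · rintro (h | h)
      · exact absurd h (by exact_mod_cast Nat.succ_ne_zero k)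
      · exact h
    · intro h
      exact Or.inr h

theorem pv_main (n : Nat) (tl : List Char) (i : Nat) (hn : tl.length - i ≤ n)
    (quote : Option Char) (result : List String) :
    (((PySem.List.enumerate tl).drop i).foldl (pvStep tl)
        ⟨0, quote, decide (pvLastNWs result = some '?'), (result.map String.toList).flatten⟩).out
      = ((pvLoopA (tl.drop i) (pvPrev tl i) quote.isSome quote result).map String.toList).flatten := by
  induction n generalizing i quote result with
  | zero =>
    have hge : tl.length ≤ i := by omega
    rw [List.drop_eq_nil_of_le hge,
      List.drop_eq_nil_of_le (by simpa [PySem.List.length_enumerate] using hge)]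
    rw [List.foldl_nil, pvLoopA]
  | succ n ih =>
    by_cases hlt : i < tl.length
    · -- decompose both drops
      have hE : ((PySem.List.enumerate tl).drop i)
          = ((i : Int), tl[i]) :: ((PySem.List.enumerate tl).drop (i + 1)) := by
        rw [List.drop_eq_getElem_cons (by simpa [PySem.List.length_enumerate] using hlt)]
        congr 1
        rw [PySem.List.getElem_enumerate]
        simp
      have hT : tl.drop i = tl[i] :: tl.drop (i + 1) := List.drop_eq_getElem_cons hlt
      set c := tl[i] with hc
      rw [hE, hT, List.foldl_cons, pvLoopA]
      -- evaluate the step (skip = 0)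
      rw [show pvStep tl ⟨0, quote, decide (pvLastNWs result = some '?'),
            (result.map String.toList).flatten⟩ ((i : Int), c)
          = (let q' := pvToggle c (pvPrev tl i) quote
             let nxt := tl[i+1]?
             if q' = none ∧ c = '&' ∧ nxt = some '&' then
               ⟨1, q', false, (result.map String.toList).flatten ++ (" and ").toList⟩
             else if q' = none ∧ c = '|' ∧ nxt = some '|' then
               ⟨1, q', false, (result.map String.toList).flatten ++ (" or ").toList⟩
             else if q' = none ∧ c = '!' ∧ nxt ≠ none ∧ nxt ≠ some '=' then
               if decide (pvLastNWs result = some '?') = true ∧ nxt = some '(' then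
                 ⟨1, q', false, (result.map String.toList).flatten ++ ("(not ").toList⟩
               else
                 ⟨0, q', false, (result.map String.toList).flatten ++ ("not ").toList⟩
             else
               ⟨0, q', (if PySem.Chars.isspace c then decide (pvLastNWs result = some '?')
                          else decide (c = '?')),
                 (result.map String.toList).flatten ++ [c]⟩ : PvSt) from by
        unfold pvStep
        rw [if_neg (by simp)]
        have hq : (if ((c = '"' ∨ c = '\'') ∧
              (((i : Int)) = 0 ∨ PySem.List.pyGet? tl (((i : Int)) - 1) ≠ some '\\')) then
              match quote with
              | none => some c
              | some q => if q = c then none else some q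
            else quote) = pvToggle c (pvPrev tl i) quote := by
          unfold pvToggle
          by_cases hb : pvPrev tl i ≠ some '\\'
          · by_cases hcq : (c = '"' ∨ c = '\'')
            · rw [if_pos ⟨hcq, (pv_bs_eq tl i).mpr hb⟩, if_pos ⟨hcq, hb⟩]
            · rw [if_neg (fun h => hcq h.1), if_neg (fun h => hcq h.1)]
          · rw [if_neg (fun h => hb ((pv_bs_eq tl i).mp h.2)),
              if_neg (fun h => hb h.2)]
        have hn' : PySem.List.pyGet? tl ((i : Int) + 1) = tl[i+1]? := by
          rw [show ((i : Int) + 1) = ((i + 1 : Nat) : Int) from by push_cast; ring,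
            PySem.List.pyGet?_natCast]
        simp only [hq, hn']]
      simp only []
      -- name the toggled quote and relate A's track
      rw [pv_track_eq]
      dsimp only
      have hhead : (tl.drop (i+1)).head? = tl[i+1]? := by
        cases h : tl.drop (i+1) with
        | nil =>
          have hlen : tl.length ≤ i + 1 := List.drop_eq_nil_iff.mp h
          simp [List.getElem?_eq_none hlen]
        | cons a t =>
          have h1 : (tl.drop (i+1))[0]? = tl[i+1]? := by
            rw [List.getElem?_drop]
          rw [h] at h1
          simpa using h1
      have hne : (tl.drop (i+1) ≠ []) ↔ tl[i+1]? ≠ none := by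
        rw [← hhead]
        constructor
        · intro h hh; exact h (List.head?_eq_none_iff.mp hh)
        · intro h hh; exact h (by rw [hh]; rfl)
      have htail : (tl.drop (i+1)).tail = tl.drop (i+2) := by
        rw [List.tail_drop]
      by_cases hq0 : pvToggle c (pvPrev tl i) quote = none
      by_cases hq0 : pvToggle c (pvPrev tl i) quote = none
      · rw [hq0]
        rw [if_pos (show (none : Option Char).isSome = false from rfl)]
        by_cases h2 : c = '&' ∧ tl[i+1]? = some '&'
        · rw [if_pos (show (none : Option Char) = none ∧ c = '&' ∧ tl[i+1]? = some '&' from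
              ⟨rfl, h2.1, h2.2⟩),
            if_pos (show c = '&' ∧ (tl.drop (i+1)).head? = some '&' from
              ⟨h2.1, by rw [hhead]; exact h2.2⟩)]
          have hlt2 : i + 1 < tl.length := by
            by_contra hge
            push_neg at hge
            rw [List.getElem?_eq_none hge] at h2
            exact absurd h2.2 (by simp)
          have hE2 : ((PySem.List.enumerate tl).drop (i+1))
              = (((i+1 : Nat) : Int), tl[i+1]) :: ((PySem.List.enumerate tl).drop (i + 2)) := by
            rw [List.drop_eq_getElem_cons (by simpa [PySem.List.length_enumerate] using hlt2)]
            congr 1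
            rw [PySem.List.getElem_enumerate]
            simp
          rw [hE2, List.foldl_cons,
            show pvStep tl ⟨1, none, false, (result.map String.toList).flatten ++ (" and ").toList⟩
                (((i+1 : Nat) : Int), tl[i+1])
              = ⟨0, none, false, (result.map String.toList).flatten ++ (" and ").toList⟩ from by
              unfold pvStep
              rw [if_pos (by simp)]
              rfl]
          have hres : (result.map String.toList).flatten ++ (" and ").toList
              = ((result ++ [" and "]).map String.toList).flatten := by simp
          have hflag : (false : Bool) = decide (pvLastNWs (result ++ [" and "]) = some '?') := by
            rw [pvLastNWs_append]; rfl
          rw [hres, hflag, htail,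
            ← show pvPrev tl (i+2) = some '&' from by
              unfold pvPrev
              rw [if_neg (by omega)]
              have hi : tl[i+2-1]? = tl[i+1]? := by norm_num
              rw [hi, h2.2]]
          exact ih (i+2) (by omega) none (result ++ [" and "])
        · rw [if_neg (fun h : (none : Option Char) = none ∧ c = '&' ∧ tl[i+1]? = some '&' =>
              h2 ⟨h.2.1, h.2.2⟩),
            if_neg (fun h : c = '&' ∧ (tl.drop (i+1)).head? = some '&' =>
              h2 ⟨h.1, by rw [← hhead]; exact h.2⟩)]
          by_cases h3 : c = '|' ∧ tl[i+1]? = some '|'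
          · rw [if_pos (show (none : Option Char) = none ∧ c = '|' ∧ tl[i+1]? = some '|' from
                ⟨rfl, h3.1, h3.2⟩),
              if_pos (show c = '|' ∧ (tl.drop (i+1)).head? = some '|' from
                ⟨h3.1, by rw [hhead]; exact h3.2⟩)]
            have hlt2 : i + 1 < tl.length := by
              by_contra hge
              push_neg at hge
              rw [List.getElem?_eq_none hge] at h3
              exact absurd h3.2 (by simp)
            have hE2 : ((PySem.List.enumerate tl).drop (i+1))
                = (((i+1 : Nat) : Int), tl[i+1]) :: ((PySem.List.enumerate tl).drop (i + 2)) := by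
              rw [List.drop_eq_getElem_cons (by simpa [PySem.List.length_enumerate] using hlt2)]
              congr 1
              rw [PySem.List.getElem_enumerate]
              simp
            rw [hE2, List.foldl_cons,
              show pvStep tl ⟨1, none, false, (result.map String.toList).flatten ++ (" or ").toList⟩
                  (((i+1 : Nat) : Int), tl[i+1])
                = ⟨0, none, false, (result.map String.toList).flatten ++ (" or ").toList⟩ from by
                unfold pvStep
                rw [if_pos (by simp)]
                rfl]
            have hres : (result.map String.toList).flatten ++ (" or ").toList
                = ((result ++ [" or "]).map String.toList).flatten := by simp
            have hflag : (false : Bool) = decide (pvLastNWs (result ++ [" or "]) = some '?') := by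
              rw [pvLastNWs_append]; rfl
            rw [hres, hflag, htail,
              ← show pvPrev tl (i+2) = some '|' from by
                unfold pvPrev
                rw [if_neg (by omega)]
                have hi : tl[i+2-1]? = tl[i+1]? := by norm_num
                rw [hi, h3.2]]
            exact ih (i+2) (by omega) none (result ++ [" or "])
          · rw [if_neg (fun h : (none : Option Char) = none ∧ c = '|' ∧ tl[i+1]? = some '|' =>
                h3 ⟨h.2.1, h.2.2⟩),
              if_neg (fun h : c = '|' ∧ (tl.drop (i+1)).head? = some '|' =>
                h3 ⟨h.1, by rw [← hhead]; exact h.2⟩)]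
            by_cases h4 : c = '!' ∧ tl[i+1]? ≠ none ∧ tl[i+1]? ≠ some '='
            · rw [if_pos (show (none : Option Char) = none ∧ c = '!' ∧ tl[i+1]? ≠ none ∧
                    tl[i+1]? ≠ some '=' from ⟨rfl, h4.1, h4.2.1, h4.2.2⟩),
                if_pos (show c = '!' ∧ tl.drop (i+1) ≠ [] ∧ (tl.drop (i+1)).head? ≠ some '=' from
                  ⟨h4.1, hne.mpr h4.2.1, by rw [hhead]; exact h4.2.2⟩)]
              by_cases h5 : pvLastNWs result = some '?' ∧ tl[i+1]? = some '('
              · rw [if_pos (show decide (pvLastNWs result = some '?') = true ∧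
                      tl[i+1]? = some '(' from ⟨by simp [h5.1], h5.2⟩),
                  if_pos (show result ≠ [] ∧
                      PySem.Chars.endswith (PySem.Chars.rstrip
                        (PySem.Chars.join [] (result.map String.toList))) ['?'] = true ∧
                      (tl.drop (i+1)).head? = some '(' from
                    ⟨((pv_cond_iff result).mpr h5.1).1, ((pv_cond_iff result).mpr h5.1).2,
                      by rw [hhead]; exact h5.2⟩)]
                have hlt2 : i + 1 < tl.length := by
                  by_contra hge
                  push_neg at hge
                  rw [List.getElem?_eq_none hge] at h5
                  exact absurd h5.2 (by simp)
                have hE2 : ((PySem.List.enumerate tl).drop (i+1))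
                    = (((i+1 : Nat) : Int), tl[i+1]) :: ((PySem.List.enumerate tl).drop (i + 2)) := by
                  rw [List.drop_eq_getElem_cons (by simpa [PySem.List.length_enumerate] using hlt2)]
                  congr 1
                  rw [PySem.List.getElem_enumerate]
                  simp
                rw [hE2, List.foldl_cons,
                  show pvStep tl ⟨1, none, false,
                        (result.map String.toList).flatten ++ ("(not ").toList⟩
                      (((i+1 : Nat) : Int), tl[i+1])
                    = ⟨0, none, false, (result.map String.toList).flatten ++ ("(not ").toList⟩ from by
                    unfold pvStep
                    rw [if_pos (by simp)]
                    rfl]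
                have hres : (result.map String.toList).flatten ++ ("(not ").toList
                    = ((result ++ ["(not "]).map String.toList).flatten := by simp
                have hflag : (false : Bool)
                    = decide (pvLastNWs (result ++ ["(not "]) = some '?') := by
                  rw [pvLastNWs_append]; rfl
                rw [hres, hflag, htail,
                  ← show pvPrev tl (i+2) = some '(' from by
                    unfold pvPrev
                    rw [if_neg (by omega)]
                    have hi : tl[i+2-1]? = tl[i+1]? := by norm_num
                    rw [hi, h5.2]]
                exact ih (i+2) (by omega) none (result ++ ["(not "])
              · rw [if_neg (fun h : decide (pvLastNWs result = some '?') = true ∧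
                      tl[i+1]? = some '(' => h5 ⟨by simpa using h.1, h.2⟩),
                  if_neg (fun h : result ≠ [] ∧
                      PySem.Chars.endswith (PySem.Chars.rstrip
                        (PySem.Chars.join [] (result.map String.toList))) ['?'] = true ∧
                      (tl.drop (i+1)).head? = some '(' =>
                    h5 ⟨(pv_cond_iff result).mp ⟨h.1, h.2.1⟩, by rw [← hhead]; exact h.2.2⟩)]
                have hres : (result.map String.toList).flatten ++ ("not ").toList
                    = ((result ++ ["not "]).map String.toList).flatten := by simp
                have hflag : (false : Bool)
                    = decide (pvLastNWs (result ++ ["not "]) = some '?') := by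
                  rw [pvLastNWs_append]; rfl
                rw [hres, hflag,
                  ← show pvPrev tl (i+1) = some '!' from by
                    unfold pvPrev
                    rw [if_neg (by omega)]
                    have hi : tl[i+1-1]? = tl[i]? := by norm_num
                    rw [hi, List.getElem?_eq_getElem hlt, ← hc, h4.1]]
                exact ih (i+1) (by omega) none (result ++ ["not "])
            · rw [if_neg (fun h : (none : Option Char) = none ∧ c = '!' ∧ tl[i+1]? ≠ none ∧
                    tl[i+1]? ≠ some '=' => h4 ⟨h.2.1, h.2.2.1, h.2.2.2⟩),
                if_neg (fun h : c = '!' ∧ tl.drop (i+1) ≠ [] ∧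
                    (tl.drop (i+1)).head? ≠ some '=' =>
                  h4 ⟨h.1, hne.mp h.2.1, by rw [← hhead]; exact h.2.2⟩)]
              have hres : (result.map String.toList).flatten ++ [c]
                  = ((result ++ [String.ofList [c]]).map String.toList).flatten := by simp
              have hflag : (if PySem.Chars.isspace c then decide (pvLastNWs result = some '?')
                    else decide (c = '?'))
                  = decide (pvLastNWs (result ++ [String.ofList [c]]) = some '?') := by
                rw [pvLastNWs_append]
                by_cases h : PySem.Chars.isspace c = true <;>
                  simp [pvLastNW_single, h, Option.or]
              rw [hres, hflag,
                ← show pvPrev tl (i+1) = some c from by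
                  unfold pvPrev
                  rw [if_neg (by omega)]
                  have hi : tl[i+1-1]? = tl[i]? := by norm_num
                  rw [hi, List.getElem?_eq_getElem hlt, ← hc]]
              exact ih (i+1) (by omega) none (result ++ [String.ofList [c]])
      all_goals (
        rw [if_neg (show ¬((pvToggle c (pvPrev tl i) quote).isSome = false) from by
            simp [hq0]),
          if_neg (fun h : pvToggle c (pvPrev tl i) quote = none ∧ c = '&' ∧
              tl[i+1]? = some '&' => hq0 h.1),
          if_neg (fun h : pvToggle c (pvPrev tl i) quote = none ∧ c = '|' ∧
              tl[i+1]? = some '|' => hq0 h.1),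
          if_neg (fun h : pvToggle c (pvPrev tl i) quote = none ∧ c = '!' ∧
              tl[i+1]? ≠ none ∧ tl[i+1]? ≠ some '=' => hq0 h.1)]
        have hres : (result.map String.toList).flatten ++ [c]
            = ((result ++ [String.ofList [c]]).map String.toList).flatten := by simp
        have hflag : (if PySem.Chars.isspace c then decide (pvLastNWs result = some '?')
              else decide (c = '?'))
            = decide (pvLastNWs (result ++ [String.ofList [c]]) = some '?') := by
          rw [pvLastNWs_append]
          by_cases h : PySem.Chars.isspace c = true <;>
            simp [pvLastNW_single, h, Option.or]
        rw [hres, hflag,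
          ← show pvPrev tl (i+1) = some c from by
            unfold pvPrev
            rw [if_neg (by omega)]
            have hi : tl[i+1-1]? = tl[i]? := by norm_num
            rw [hi, List.getElem?_eq_getElem hlt, ← hc]]
        exact ih (i+1) (by omega) (pvToggle c (pvPrev tl i) quote) (result ++ [String.ofList [c]]))
    · have hge : tl.length ≤ i := by omega
      rw [List.drop_eq_nil_of_le hge,
        List.drop_eq_nil_of_le (by simpa [PySem.List.length_enumerate] using hge)]
      rw [List.foldl_nil, pvLoopA]

-- ===== VERDICT =====
theorem normalize_logical_operators_py_spec : Claim_equal_normalize_logical_operators_py := by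
  intro template _
  unfold Spec_normalize_logical_operators_py normalize_logical_operators_py normalize_logical_operators_py_alt
  have h := pv_main template.toList.length template.toList 0 (by omega) none []
  simp only [List.drop_zero] at h
  rw [show pvPrev template.toList 0 = none from rfl] at h
  rw [show (⟨0, none, decide (pvLastNWs [] = some '?'), (List.map String.toList ([] : List String)).flatten⟩ : PvSt)
      = (⟨0, none, false, []⟩ : PvSt) from rfl] at h
  rw [h]
  rw [show (none : Option Char).isSome = false from rfl]
  have hx : PySem.Str.join "" (pvLoopA template.toList none false none [])
      = String.ofList ((PySem.Str.join "" (pvLoopA template.toList none false none [])).toList) :=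
    (String.ofList_toList).symm
  conv_lhs => rw [hx]
  exact congrArg String.ofList (by simp [PySem.Str.toList_join, pv_join_nil_eq_flatten])
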